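-- pv_equiv track=rewrite | github.com/jadergreiner/crypto-futures-agent | scripts/fix_markdown_lint.py | fix_code_block_language
-- ===== SOURCE A (Python) =====
-- def fix_code_block_language(content):
--     """
--     Adiciona linguagem a blocos de código sem especificação.
--     Detecta contexto para sugerir linguagem apropriada.
--     """
--     lines = content.split('\n')
--     fixed_lines = []
--     i = 0
--
--     while i < len(lines):
--         line = lines[i]
--
--         # Detectar bloco ``` sem linguagem
--         if line.strip() == '```':
--             # Procurar contexto anterior para detectar tipo
--             context = ''
--             for j in range(max(0, i - 5), i):
--                 context += lines[j].lower() + ' '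
--
--             # Inteligência: determinar linguagem baseado em contexto
--             if 'sql' in context or 'database' in context or 'query' in context:
--                 suggested = 'sql'
--             elif 'python' in context or 'script' in context or '.py' in context:
--                 suggested = 'python'
--             elif 'bash' in context or 'command' in context or '$' in context \
--                     or 'terminal' in context or 'shell' in context:
--                 suggested = 'bash'
--             elif 'json' in context:
--                 suggested = 'json'
--             elif 'yaml' in context or 'yml' in context:
--                 suggested = 'yaml'
--             elif 'markdown' in context or '.md' in context:
--                 suggested = 'markdown'
--             else:
--                 # Default: tentar detectar pelo conteúdo do bloco
--                 suggested = detect_language_from_content(lines, i)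
--
--             # Adicionar linguagem
--             fixed_lines.append(f'```{suggested}')
--             i += 1
--
--             # Processar conteúdo do bloco até encontrar fechamento
--             while i < len(lines) and lines[i].strip() != '```':
--                 fixed_lines.append(lines[i])
--                 i += 1
--
--             # Adicionar fechamento
--             if i < len(lines):
--                 fixed_lines.append('```')
--                 i += 1
--         else:
--             fixed_lines.append(line)
--             i += 1
--
--     return '\n'.join(fixed_lines)
--
-- def detect_language_from_content(lines, start_idx):
--     """Detecta linguagem pelo conteúdo do bloco de código."""
--     content = ''
--     for i in range(start_idx + 1, min(start_idx + 20, len(lines))):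
--         if lines[i].strip() == '```':
--             break
--         content += lines[i] + '\n'
--
--     # Heurísticas
--     if 'import ' in content or 'def ' in content or 'class ' in content:
--         return 'python'
--     elif 'SELECT' in content.upper() or 'INSERT' in content.upper():
--         return 'sql'
--     elif '{' in content and '"' in content:
--         return 'json'
--     elif '--' in content or '#!/bin/bash' in content:
--         return 'bash'
--     else:
--         return 'txt'
-- ===== SOURCE B (Python) =====
-- # B: two-phase rewrite — classify each line once with a running fence-parity counter
-- # (single linear pass) instead of A's nested consume-the-block while loops.
--
-- _KEYWORDS = [
--     ('sql', 'sql'), ('database', 'sql'), ('query', 'sql'),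
--     ('python', 'python'), ('script', 'python'), ('.py', 'python'),
--     ('bash', 'bash'), ('command', 'bash'), ('$', 'bash'),
--     ('terminal', 'bash'), ('shell', 'bash'),
--     ('json', 'json'),
--     ('yaml', 'yaml'), ('yml', 'yaml'),
--     ('markdown', 'markdown'), ('.md', 'markdown'),
-- ]
--
--
-- def _detect_from_block(lines, i):
--     seg = lines[i + 1:i + 20]
--     fence_pos = next((n for n, l in enumerate(seg) if l.strip() == '```'), len(seg))
--     content = ''.join(l + '\n' for l in seg[:fence_pos])
--
--     if 'import ' in content or 'def ' in content or 'class ' in content: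
--         return 'python'
--     elif 'SELECT' in content.upper() or 'INSERT' in content.upper():
--         return 'sql'
--     elif '{' in content and '"' in content:
--         return 'json'
--     elif '--' in content or '#!/bin/bash' in content:
--         return 'bash'
--     else:
--         return 'txt'
--
--
-- def _suggest_language(lines, i):
--     context = ''.join(l.lower() + ' ' for l in lines[max(0, i - 5):i])
--     for kw, lang in _KEYWORDS:
--         if kw in context:
--             return lang
--     return _detect_from_block(lines, i)
--
--
-- def fix_code_block_language(content):
--     lines = content.split('\n')
--     out = []
--     fences_seen = 0
--     for k, line in enumerate(lines):
--         if line.strip() != '```':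
--             out.append(line)
--         else:
--             if fences_seen % 2 == 0:
--                 out.append('```' + _suggest_language(lines, k))
--             else:
--                 out.append('```')
--             fences_seen += 1
--     return '\n'.join(out)
-- ===== Notes on version B (the rewrite author's own statement) =====
-- stated objective: simpler
-- what changed: A's nested while loops (outer scan plus an inner loop that consumes each code block) are replaced by a single linear pass that classifies every line once using a running bare-fence parity counter, with the language suggestion done via an ordered keyword table and a slice-based block detector instead of if/elif chains and index loops.
import Mathlib
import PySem

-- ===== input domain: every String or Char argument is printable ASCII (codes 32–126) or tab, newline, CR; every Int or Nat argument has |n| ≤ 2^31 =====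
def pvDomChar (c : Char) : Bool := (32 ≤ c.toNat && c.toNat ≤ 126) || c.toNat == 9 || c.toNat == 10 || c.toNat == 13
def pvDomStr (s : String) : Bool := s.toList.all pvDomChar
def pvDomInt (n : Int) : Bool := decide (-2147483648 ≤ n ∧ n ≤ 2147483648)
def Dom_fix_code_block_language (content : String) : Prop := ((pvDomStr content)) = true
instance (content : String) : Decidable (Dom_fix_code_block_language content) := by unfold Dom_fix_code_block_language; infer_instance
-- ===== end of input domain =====

-- B replaces A's nested consume-the-block while loops by one linear pass with a
-- running fence-parity counter (objective: simpler decomposition, same values).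

-- shared one-line predicate: line.strip() == '```'
def pvBare (l : String) : Bool := PySem.Str.strip l == "```"

-- ===== PORT A =====

-- context accumulation loop: for j in range(max(0, i-5), i): context += lines[j].lower() + ' '
def pvCtxA (lines : List String) (i : Nat) : String :=
  (List.range' (i - 5) (i - (i - 5))).foldl
    (fun acc j => acc ++ PySem.Str.lower (lines.getD j "") ++ " ") ""

-- detect_language_from_content's accumulation loop with its break at a bare fence
def pvDetectLoopA (lines : List String) : List Nat → String → String
  | [], acc => acc
  | j :: js, acc =>
      if pvBare (lines.getD j "") then acc
      else pvDetectLoopA lines js (acc ++ lines.getD j "" ++ "\n")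

-- detect_language_from_content(lines, start_idx)
def pvDetectA (lines : List String) (i : Nat) : String :=
  let content := pvDetectLoopA lines (List.range' (i + 1) (min (i + 20) lines.length - (i + 1))) ""
  if PySem.Str.isIn "import " content || PySem.Str.isIn "def " content || PySem.Str.isIn "class " content then "python"
  else if PySem.Str.isIn "SELECT" (PySem.Str.upper content) || PySem.Str.isIn "INSERT" (PySem.Str.upper content) then "sql"
  else if PySem.Str.isIn "{" content && PySem.Str.isIn "\"" content then "json"
  else if PySem.Str.isIn "--" content || PySem.Str.isIn "#!/bin/bash" content then "bash"
  else "txt"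

-- the if/elif keyword chain of A
def pvSuggestA (lines : List String) (i : Nat) : String :=
  let context := pvCtxA lines i
  if PySem.Str.isIn "sql" context || PySem.Str.isIn "database" context || PySem.Str.isIn "query" context then "sql"
  else if PySem.Str.isIn "python" context || PySem.Str.isIn "script" context || PySem.Str.isIn ".py" context then "python"
  else if PySem.Str.isIn "bash" context || PySem.Str.isIn "command" context || PySem.Str.isIn "$" context || PySem.Str.isIn "terminal" context || PySem.Str.isIn "shell" context then "bash"
  else if PySem.Str.isIn "json" context then "json"
  else if PySem.Str.isIn "yaml" context || PySem.Str.isIn "yml" context then "yaml"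
  else if PySem.Str.isIn "markdown" context || PySem.Str.isIn ".md" context then "markdown"
  else pvDetectA lines i

-- inner while: collect block body until a bare fence (the final i of the
-- Python loop is start + number of collected lines)
def pvInnerA (lines : List String) (i : Nat) : List String :=
  if h : i < lines.length then
    if pvBare lines[i] then []
    else lines[i] :: pvInnerA lines (i + 1)
  else []
termination_by lines.length - i
decreasing_by exact Nat.sub_succ_lt_self lines.length i h

-- outer while loop of A
def pvOuterA (lines : List String) (i : Nat) : List String :=
  if h : i < lines.length then
    if pvBare lines[i] then
      let body := pvInnerA lines (i + 1)
      if i + 1 + body.length < lines.length then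
        ("```" ++ pvSuggestA lines i) :: (body ++ ["```"]) ++ pvOuterA lines (i + 1 + body.length + 1)
      else ("```" ++ pvSuggestA lines i) :: body
    else lines[i] :: pvOuterA lines (i + 1)
  else []
termination_by lines.length - i
decreasing_by
  · exact Nat.sub_lt_sub_left h (by omega)
  · exact Nat.sub_succ_lt_self lines.length i h

def fix_code_block_language (content : String) : String :=
  PySem.Str.join "\n" (pvOuterA ((PySem.Str.split? content "\n").getD []) 0)

-- ===== PORT B =====

-- the ordered keyword table of Source B
def pvKw : List (String × String) :=
  [("sql", "sql"), ("database", "sql"), ("query", "sql"),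
   ("python", "python"), ("script", "python"), (".py", "python"),
   ("bash", "bash"), ("command", "bash"), ("$", "bash"),
   ("terminal", "bash"), ("shell", "bash"),
   ("json", "json"),
   ("yaml", "yaml"), ("yml", "yaml"),
   ("markdown", "markdown"), (".md", "markdown")]

-- _detect_from_block: slice, cut at first bare fence, join
def pvDetectB (lines : List String) (i : Nat) : String :=
  let seg := (lines.drop (i + 1)).take 19
  let fencePos := seg.findIdx pvBare
  let content := PySem.Str.join "" ((seg.take fencePos).map (fun l => l ++ "\n"))
  if PySem.Str.isIn "import " content || PySem.Str.isIn "def " content || PySem.Str.isIn "class " content then "python"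
  else if PySem.Str.isIn "SELECT" (PySem.Str.upper content) || PySem.Str.isIn "INSERT" (PySem.Str.upper content) then "sql"
  else if PySem.Str.isIn "{" content && PySem.Str.isIn "\"" content then "json"
  else if PySem.Str.isIn "--" content || PySem.Str.isIn "#!/bin/bash" content then "bash"
  else "txt"

-- 'for kw, lang in _KEYWORDS: if kw in context: return lang' (falls through to detect)
def pvScanKw (lines : List String) (i : Nat) (context : String) : List (String × String) → String
  | [] => pvDetectB lines i
  | (kw, lang) :: rest =>
      if PySem.Str.isIn kw context then lang else pvScanKw lines i context rest

-- _suggest_language(lines, i)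
def pvSuggestB (lines : List String) (i : Nat) : String :=
  pvScanKw lines i
    (PySem.Str.join "" (((lines.drop (i - 5)).take (i - (i - 5))).map (fun l => PySem.Str.lower l ++ " ")))
    pvKw

-- the single pass with the fence-parity counter
def pvLoopB (lines : List String) (k seen : Nat) : List String :=
  if h : k < lines.length then
    if !pvBare lines[k] then lines[k] :: pvLoopB lines (k + 1) seen
    else
      (if seen % 2 == 0 then "```" ++ pvSuggestB lines k else "```") :: pvLoopB lines (k + 1) (seen + 1)
  else []
termination_by lines.length - k

def fix_code_block_language_alt (content : String) : String :=
  PySem.Str.join "\n" (pvLoopB ((PySem.Str.split? content "\n").getD []) 0 0)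

-- ===== PRECONDITION & SPEC =====
def Spec_fix_code_block_language (content : String) (out : String) : Prop := out = fix_code_block_language_alt content
instance (content : String) (out : String) : Decidable (Spec_fix_code_block_language content out) := by unfold Spec_fix_code_block_language; infer_instance

-- ===== CLAIM (what is proved, stated in full; the proofs are below) =====
def Claim_equal_fix_code_block_language : Prop := ∀ (content : String), Dom_fix_code_block_language content → Spec_fix_code_block_language content (fix_code_block_language content)

-- ===== LEMMAS AND PROOFS =====

theorem pvJoinEmpty_nil : PySem.Str.join "" ([] : List String) = "" := by
  apply String.toList_inj.mp
  simp [PySem.Chars.join_nil]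

theorem pvJoinEmpty_cons (x : String) (t : List String) :
    PySem.Str.join "" (x :: t) = x ++ PySem.Str.join "" t := by
  apply String.toList_inj.mp
  cases t <;> simp [PySem.Chars.join_nil, PySem.Chars.join_singleton, PySem.Chars.join_cons_cons]

theorem pv_if_or {α : Type} (a b : Bool) (x y : α) :
    (if (a || b) = true then x else y) = if a = true then x else if b = true then x else y := by
  cases a <;> simp

theorem pv_ctx_eq (xs : List String) :
    ∀ (n a : Nat) (acc : String), a + n ≤ xs.length →
      (List.range' a n).foldl (fun acc j => acc ++ PySem.Str.lower (xs.getD j "") ++ " ") acc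
        = acc ++ PySem.Str.join "" (((xs.drop a).take n).map (fun l => PySem.Str.lower l ++ " ")) := by
  intro n
  induction n with
  | zero => intro a acc _; simp [pvJoinEmpty_nil, String.append_empty]
  | succ n ih =>
      intro a acc h
      have ha : a < xs.length := by omega
      rw [List.range'_succ, List.foldl_cons]
      rw [ih (a + 1) _ (by omega)]
      rw [List.drop_eq_getElem_cons ha]
      simp only [List.take_succ_cons, List.map_cons, pvJoinEmpty_cons]
      rw [List.getD_eq_getElem xs "" ha]
      simp [String.append_assoc]

theorem pv_detectLoop_eq (xs : List String) :
    ∀ (n a : Nat) (acc : String), a + n ≤ xs.length →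
      pvDetectLoopA xs (List.range' a n) acc
        = acc ++ PySem.Str.join "" ((((xs.drop a).take n).takeWhile (fun l => !pvBare l)).map (fun l => l ++ "\n")) := by
  intro n
  induction n with
  | zero => intro a acc _; simp [pvDetectLoopA, pvJoinEmpty_nil, String.append_empty]
  | succ n ih =>
      intro a acc h
      have ha : a < xs.length := by omega
      rw [List.range'_succ]
      rw [List.drop_eq_getElem_cons ha]
      simp only [List.take_succ_cons, List.takeWhile_cons]
      rw [pvDetectLoopA]
      rw [List.getD_eq_getElem xs "" ha]
      by_cases hb : pvBare xs[a]
      · simp [hb, pvJoinEmpty_nil, String.append_empty]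
      · simp only [hb, Bool.not_false, if_true, List.map_cons, pvJoinEmpty_cons]
        rw [ih (a + 1) _ (by omega)]
        simp [String.append_assoc]

theorem pv_take_findIdx (p : α → Bool) (l : List α) :
    l.take (l.findIdx p) = l.takeWhile (fun x => !p x) := by
  induction l with
  | nil => simp
  | cons x t ih =>
      by_cases hp : p x
      · simp [List.findIdx_cons, hp]
      · simp [List.findIdx_cons, hp, ih]

theorem pv_detect_eq (lines : List String) (i : Nat) : pvDetectA lines i = pvDetectB lines i := by
  have hc : pvDetectLoopA lines (List.range' (i + 1) (min (i + 20) lines.length - (i + 1))) ""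
      = PySem.Str.join "" (((((lines.drop (i + 1)).take 19).take (((lines.drop (i + 1)).take 19).findIdx pvBare)).map (fun l => l ++ "\n"))) := by
    rw [pv_take_findIdx]
    by_cases hl : i + 1 ≤ lines.length
    · have hm : (i + 1) + (min (i + 20) lines.length - (i + 1)) ≤ lines.length := by omega
      rw [pv_detectLoop_eq lines _ _ "" hm]
      have hseg : (lines.drop (i + 1)).take (min (i + 20) lines.length - (i + 1)) = (lines.drop (i + 1)).take 19 := by
        have hlen : (lines.drop (i + 1)).length = lines.length - (i + 1) := by simp
        by_cases h19 : lines.length ≤ i + 20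
        · rw [List.take_of_length_le (by omega), List.take_of_length_le (by omega)]
        · have : min (i + 20) lines.length - (i + 1) = 19 := by omega
          rw [this]
      rw [hseg]
      apply String.toList_inj.mp
      simp
    · have h0 : min (i + 20) lines.length - (i + 1) = 0 := by omega
      have hd : lines.drop (i + 1) = [] := List.drop_eq_nil_of_le (by omega)
      rw [h0, hd]
      simp [pvDetectLoopA, pvJoinEmpty_nil]
  simp only [pvDetectA, pvDetectB]
  rw [hc]

theorem pv_suggest_eq (lines : List String) (i : Nat) (h : i ≤ lines.length) :
    pvSuggestA lines i = pvSuggestB lines i := by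
  have hctx : pvCtxA lines i
      = PySem.Str.join "" (((lines.drop (i - 5)).take (i - (i - 5))).map (fun l => PySem.Str.lower l ++ " ")) := by
    have := pv_ctx_eq lines (i - (i - 5)) (i - 5) "" (by omega)
    simpa [pvCtxA] using this
  simp only [pvSuggestA, pvSuggestB, pvScanKw, pvKw]
  rw [hctx, pv_detect_eq]
  simp only [pv_if_or]

theorem pv_odd (lines : List String) :
    ∀ (fuel i seen : Nat), lines.length - i ≤ fuel → seen % 2 = 1 →
      pvLoopB lines i seen
        = pvInnerA lines i ++
            (if i + (pvInnerA lines i).length < lines.length then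
              "```" :: pvLoopB lines (i + (pvInnerA lines i).length + 1) (seen + 1) else []) := by
  intro fuel
  induction fuel with
  | zero =>
      intro i seen hf _
      have hi : ¬ i < lines.length := by omega
      rw [pvLoopB, pvInnerA]
      simp [hi]
  | succ f ih =>
      intro i seen hodd hf
      by_cases hi : i < lines.length
      · by_cases hb : pvBare lines[i]
        · rw [pvLoopB, pvInnerA]
          have : (seen % 2 == 0) = false := by simp [hf]
          simp [hi, hb, this]
        · rw [pvLoopB, pvInnerA]
          simp only [dif_pos hi, hb, Bool.not_false, Bool.false_eq_true, if_false, if_true]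
          rw [ih (i + 1) seen (by omega) hf]
          have harith : i + 1 + (pvInnerA lines (i + 1)).length
              = i + ((pvInnerA lines (i + 1)).length + 1) := by omega
          simp [harith]
      · rw [pvLoopB, pvInnerA]
        simp [hi]

theorem pv_even (lines : List String) :
    ∀ (fuel i seen : Nat), lines.length - i ≤ fuel → seen % 2 = 0 →
      pvOuterA lines i = pvLoopB lines i seen := by
  intro fuel
  induction fuel with
  | zero =>
      intro i seen hf _
      have hi : ¬ i < lines.length := by omega
      rw [pvOuterA, pvLoopB]
      simp [hi]
  | succ f ih =>
      intro i seen hf heven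
      by_cases hi : i < lines.length
      · by_cases hb : pvBare lines[i]
        · rw [pvOuterA, pvLoopB]
          have hse : (seen % 2 == 0) = true := by simp [heven]
          simp only [dif_pos hi, hb, Bool.not_true, Bool.false_eq_true, if_false, if_true, hse]
          rw [pv_odd lines (lines.length) (i + 1) (seen + 1) (by omega) (by omega)]
          rw [pv_suggest_eq lines i (by omega)]
          by_cases hj : i + 1 + (pvInnerA lines (i + 1)).length < lines.length
          · rw [ih (i + 1 + (pvInnerA lines (i + 1)).length + 1) (seen + 2) (by omega) (by omega)]
            simp [hj]
          · simp [hj]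
        · rw [pvOuterA, pvLoopB]
          simp only [dif_pos hi, hb, Bool.not_false, Bool.false_eq_true, if_false, if_true]
          rw [ih (i + 1) seen (by omega) heven]
      · rw [pvOuterA, pvLoopB]
        simp [hi]

-- ===== VERDICT (by name: the statement is the Claim_ definition above) =====
theorem fix_code_block_language_spec : Claim_equal_fix_code_block_language := by
  intro content _
  unfold Spec_fix_code_block_language fix_code_block_language fix_code_block_language_alt
  rw [pv_even ((PySem.Str.split? content "\n").getD []) ((PySem.Str.split? content "\n").getD []).length 0 0 (by omega) rfl]
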